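-- pv_equiv track=rewrite | github.com/liauzhengwei/NTU-Assignments | SC1003/Wk7 discussion reverser.py | reverseAndRepeat
-- ===== SOURCE A (Python) =====
-- def reverser(a_str):
--    if len(a_str) == 1:
--         return a_str
--
--    else:
--         new_str = reverser(a_str[1:]) + a_str[0]
--         return new_str
--
-- def reverseAndRepeat(a_str, num):
--    if len(a_str) == 1:
--         return (a_str *num)
--
--    else:
--         new_str = reverser(a_str[1:]) + a_str[0]
--         endstr = ""
--         for i in new_str:
--             a = i*num
--             endstr += a
--         return endstr
-- ===== SOURCE B (Python) =====
-- def reverseAndRepeat(a_str, num):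
--     return ''.join(c * num for c in reversed(a_str))
-- ===== Notes on version B (the rewrite author's own statement) =====
-- stated objective: idiomatic
-- what changed: B replaces A's recursive reverser helper and explicit accumulation loop with a single join over the reversed string, repeating each character as it goes.
import Mathlib
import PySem

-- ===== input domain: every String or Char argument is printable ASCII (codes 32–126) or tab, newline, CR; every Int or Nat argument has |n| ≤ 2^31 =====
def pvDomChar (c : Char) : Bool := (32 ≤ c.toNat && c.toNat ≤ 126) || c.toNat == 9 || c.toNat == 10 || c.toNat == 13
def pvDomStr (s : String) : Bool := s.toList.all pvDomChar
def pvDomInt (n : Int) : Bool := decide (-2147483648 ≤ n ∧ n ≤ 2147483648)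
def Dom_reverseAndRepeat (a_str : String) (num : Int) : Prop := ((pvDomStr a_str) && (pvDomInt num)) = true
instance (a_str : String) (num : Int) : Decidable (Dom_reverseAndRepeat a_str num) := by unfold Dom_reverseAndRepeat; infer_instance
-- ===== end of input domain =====

-- B replaces A's recursive reverser helper and accumulation loop with one join over the reversed string (objective: idiomatic).

-- ===== PORT A =====
-- helper 'reverser': Python recursion on strings, modelled on List Char ([] case is
-- unreachable under Pre_: Python diverges there, we return []).
def pvReverserA : List Char → List Char
  | [] => []
  | [c] => [c]
  | c :: d :: rest => pvReverserA (d :: rest) ++ [c]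

def reverseAndRepeat (a_str : String) (num : Int) : String :=
  match a_str.toList with
  | [] => ""   -- unreachable under Pre_: Python recurses forever on ""
  | [c] => String.mk (List.replicate num.toNat c)   -- a_str * num
  | c :: rest =>
      let new_str := pvReverserA rest ++ [c]
      String.mk (new_str.foldl (fun endstr i => endstr ++ List.replicate num.toNat i) [])

-- ===== PORT B =====
-- ''.join(c * num for c in reversed(a_str)): flatMap of the repetition over the reversed chars.
def reverseAndRepeat_alt (a_str : String) (num : Int) : String :=
  String.mk (a_str.toList.reverse.flatMap (fun c => List.replicate num.toNat c))

-- ===== PRECONDITION & SPEC =====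
-- Pre_ excludes only the empty string, on which Python A raises RecursionError (no empty base case).
def Pre_reverseAndRepeat (a_str : String) (num : Int) : Prop := a_str ≠ ""
instance (a_str : String) (num : Int) : Decidable (Pre_reverseAndRepeat a_str num) := by
  unfold Pre_reverseAndRepeat; infer_instance

def pvWitness_reverseAndRepeat : String × Int := ("ab", 2)


def Spec_reverseAndRepeat (a_str : String) (num : Int) (out : String) : Prop := out = reverseAndRepeat_alt a_str num
instance (a_str : String) (num : Int) (out : String) : Decidable (Spec_reverseAndRepeat a_str num out) := by unfold Spec_reverseAndRepeat; infer_instance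

-- ===== CLAIM (what is proved, stated in full; the proofs are below) =====
def Claim_equal_reverseAndRepeat : Prop := ∀ (a_str : String) (num : Int), Dom_reverseAndRepeat a_str num → Pre_reverseAndRepeat a_str num → Spec_reverseAndRepeat a_str num (reverseAndRepeat a_str num)

-- ===== LEMMAS AND PROOFS =====
theorem pvReverserA_eq_reverse (l : List Char) : pvReverserA l = l.reverse := by
  induction l with
  | nil => rfl
  | cons c rest ih =>
    cases rest with
    | nil => rfl
    | cons d t => simp [pvReverserA, ih]

-- ===== VERDICT (by name: the statement is the Claim_ definition above) =====
theorem reverseAndRepeat_spec : Claim_equal_reverseAndRepeat := by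
  intro a_str num _ _
  unfold Spec_reverseAndRepeat reverseAndRepeat reverseAndRepeat_alt
  cases h : a_str.toList with
  | nil => rfl
  | cons c rest =>
    cases rest with
    | nil => simp
    | cons d t =>
      simp [pvReverserA_eq_reverse]
      simp [List.flatMap]
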